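/- GENERATED by farm/mkstatement.py from design/units.tsv (unit `start_decoder.C5e`) and the assertions of Vorbis/Spec/StartDecoderC5.lean — do not edit.
   THE STATEMENT of the proof unit `start_decoder.C5e`: segment C5e of `start_decoder` (15 instructions; entries 0x11484a;
   exits 0x114668,0x11484a; ranges 0x11484a-0x114879 + 0x114846-0x114846)
   takes each of its entry assertions to one of its exit assertions (`Vorbis.Spec.StartDecoder.SegC5e`), given the contracts of its callees.
   What the names mean: Vorbis/Spec/Basic.lean (the shared hypotheses), Vorbis/Spec/StartDecoderC5.lean (the assertions). The theorem to prove: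
   `theorem start_decoder_C5e_ok : Vorbis.Spec.start_decoder_C5e.Statement`. -/
import Vorbis.Spec.StartDecoderC5
namespace Vorbis.Spec.start_decoder_C5e
open X86 X86.User Asan

/-- The statement of unit `start_decoder.C5e`. -/
def Statement : Prop :=
  ∀ (Lay : Layout) (_hLay : Lay.hi = 0x1000000) (μ : Microarch) (_hμ : UserX.MicroOK μ) (u₀ : State)
    (_hcode : HasCodeNat Lay u₀ Vorbis.L.start_decoder.entry Vorbis.Code.code_start_decoder.nat Vorbis.L.start_decoder.size)
    (_h_asan_load1_noabort : Asan.SmallCheck Lay μ Vorbis.WayInv (Vorbis.CodeOK u₀) [.rax, .rdx] 1 Vorbis.L.__asan_load1_noabort.entry)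
    (_h_asan_load4_noabort : Asan.SmallCheck Lay μ Vorbis.WayInv (Vorbis.CodeOK u₀) [.rax, .rcx, .rdx] 4 Vorbis.L.__asan_load4_noabort.entry),
    Vorbis.Spec.StartDecoder.SegC5e Lay μ u₀

end Vorbis.Spec.start_decoder_C5e
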